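-- pv_equiv track=rewrite | github.com/christear/REST | mergeCluster.py | calSamNum
-- ===== SOURCE A (Python) =====
-- def calSamNum (name_str):
--     saminf_list = name_str.split(',')
--     sam_dict = {}
--     for _sam in saminf_list:
--         _sam_id,_ = _sam.split(':')
--         sam_dict[_sam_id] = 1
--     sam_num = len(sam_dict.keys())
--     return sam_num
-- ===== SOURCE B (Python) =====
-- def calSamNum(name_str):
--     ids = []
--     for _sam in name_str.split(','):
--         _sam_id, _ = _sam.split(':')
--         ids.append(_sam_id)
--     ids.sort()
--     sam_num = 0
--     for i, x in enumerate(ids):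
--         if i == 0 or x != ids[i - 1]:
--             sam_num += 1
--     return sam_num
-- ===== Notes on version B (the rewrite author's own statement) =====
-- stated objective: alternative
-- what changed: B collects the sample ids into a list, sorts it, and counts distinct values by one scan comparing each element with its predecessor, instead of A's counting keys of a hash dict built by insertion.
import Mathlib
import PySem

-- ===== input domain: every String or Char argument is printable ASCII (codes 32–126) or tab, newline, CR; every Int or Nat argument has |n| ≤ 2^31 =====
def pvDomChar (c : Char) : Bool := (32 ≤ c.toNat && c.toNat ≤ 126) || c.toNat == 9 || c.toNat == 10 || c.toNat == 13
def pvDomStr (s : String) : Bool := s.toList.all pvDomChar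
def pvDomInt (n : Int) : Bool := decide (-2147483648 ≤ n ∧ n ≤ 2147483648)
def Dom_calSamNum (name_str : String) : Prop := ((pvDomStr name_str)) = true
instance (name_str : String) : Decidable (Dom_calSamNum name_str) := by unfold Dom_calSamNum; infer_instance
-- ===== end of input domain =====

-- B replaces A's hash-dict key counting by sort-then-count-adjacent-distinct (alternative algorithm, not faster).

-- ===== PORT A =====
-- for each part, Python does `_sam_id,_ = _sam.split(':')`: under Pre_ (exactly two pieces)
-- the bound id is the first piece, ported as `.headD []`.
def calSamNum (name_str : String) : Int :=
  let saminf_list := PySem.Chars.splitOn name_str.toList [',']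
  let sam_dict := saminf_list.foldl
    (fun d s => d.insert ((PySem.Chars.splitOn s [':']).headD []) (1 : Int))
    (PySem.Dict.empty : PySem.Dict (List Char) Int)
  (sam_dict.keys.length : Int)

-- ===== PORT B =====
-- 'for i, x in enumerate(ids): if i == 0 or x != ids[i-1]: sam_num += 1' over the sorted list,
-- transcribed as structural recursion carrying the predecessor.
def pvGoB (prev : List Char) : List (List Char) → Int
  | [] => 0
  | x :: rest => (if x = prev then 0 else 1) + pvGoB x rest

def calSamNum_alt (name_str : String) : Int :=
  let ids := (PySem.Chars.splitOn name_str.toList [',']).map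
    (fun s => (PySem.Chars.splitOn s [':']).headD [])
  match PySem.List.sorted ids (fun x => x) with
  | [] => 0
  | x :: rest => 1 + pvGoB x rest

-- ===== PRECONDITION & SPEC =====
-- Pre_: every comma-separated part contains exactly one ':'; otherwise the tuple
-- unpacking `_sam_id,_ = _sam.split(':')` raises ValueError in A (and in B).
def Pre_calSamNum (name_str : String) : Prop :=
  ∀ p ∈ name_str.toList.splitOn ',', p.count ':' = 1
instance (name_str : String) : Decidable (Pre_calSamNum name_str) := by
  unfold Pre_calSamNum; infer_instance
def pvWitness_calSamNum : String := "s1:1,s2:0,s1:2"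

def Spec_calSamNum (name_str : String) (out : Int) : Prop := out = calSamNum_alt name_str
instance (name_str : String) (out : Int) : Decidable (Spec_calSamNum name_str out) := by
  unfold Spec_calSamNum; infer_instance

-- ===== CLAIM (what is proved, stated in full; the proofs are below) =====
def Claim_equal_calSamNum : Prop := ∀ (name_str : String), Dom_calSamNum name_str → Pre_calSamNum name_str → Spec_calSamNum name_str (calSamNum name_str)

-- ===== LEMMAS AND PROOFS =====

-- A's insert loop: a key is in the final dict iff it was there already or occurs in the list.
theorem pv_mem_keys_foldl (ids : List (List Char)) (d : PySem.Dict (List Char) Int)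
    (k : List Char) :
    k ∈ (ids.foldl (fun d x => d.insert x (1 : Int)) d).keys ↔ k ∈ d.keys ∨ k ∈ ids := by
  induction ids generalizing d with
  | nil => simp
  | cons x rest ih =>
      simp only [List.foldl_cons, ih, PySem.Dict.mem_keys_insert, List.mem_cons]
      tauto

-- A's result is the number of distinct ids.
theorem pv_A_card (ids : List (List Char)) :
    ((ids.foldl (fun d x => d.insert x (1 : Int)) (PySem.Dict.empty : PySem.Dict (List Char) Int)).keys.length : Int)
      = (ids.toFinset.card : Int) := by
  have hnd : (ids.foldl (fun d x => d.insert x (1 : Int)) (PySem.Dict.empty : PySem.Dict (List Char) Int)).keys.Nodup := by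
    have := PySem.Dict.nodup_keys_foldl_insert ids (fun _ _ => (1 : Int))
      (PySem.Dict.empty : PySem.Dict (List Char) Int) (by simp)
    simpa using this
  have hset : (ids.foldl (fun d x => d.insert x (1 : Int)) (PySem.Dict.empty : PySem.Dict (List Char) Int)).keys.toFinset = ids.toFinset := by
    ext k
    simp [pv_mem_keys_foldl, PySem.Dict.empty]
  have hlen := List.toFinset_card_of_nodup hnd
  rw [hset] at hlen
  exact_mod_cast hlen.symm

theorem pv_insert_card (x : List Char) (s : Finset (List Char)) :
    (insert x s).card = (s.erase x).card + 1 := by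
  rw [show insert x s = insert x (s.erase x) by ext y; by_cases hy : y = x <;> simp [hy]]
  rw [Finset.card_insert_of_notMem (Finset.notMem_erase x _)]

-- counting adjacent-distinct in a sorted tail counts the distinct values other than the predecessor.
theorem pv_goB_card : ∀ (l : List (List Char)) (p : List Char),
    l.Pairwise (· ≤ ·) → (∀ y ∈ l, p ≤ y) →
    pvGoB p l = ((l.toFinset.erase p).card : Int) := by
  intro l
  induction l with
  | nil => intro p _ _; simp [pvGoB]
  | cons x rest ih =>
      intro p hs hp
      have hrest : rest.Pairwise (· ≤ ·) := (List.pairwise_cons.mp hs).2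
      have hx : ∀ y ∈ rest, x ≤ y := (List.pairwise_cons.mp hs).1
      have ihx := ih x hrest hx
      by_cases hxp : x = p
      · subst hxp
        have herase : (insert x rest.toFinset).erase x = rest.toFinset.erase x := by
          ext y; by_cases hy : y = x <;> simp [hy]
        simp [pvGoB, ihx, herase]
      · have hpx : p < x := lt_of_le_of_ne (hp x (by simp)) (fun h => hxp h.symm)
        have hpnot : p ∉ insert x rest.toFinset := by
          intro hmem
          rcases Finset.mem_insert.mp hmem with h | h
          · exact hxp h.symm
          · exact absurd (hx p (List.mem_toFinset.mp h)) (not_le.mpr hpx)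
        have herase : (insert x rest.toFinset).erase p = insert x rest.toFinset :=
          Finset.erase_eq_of_notMem hpnot
        simp only [List.toFinset_cons, herase, pv_insert_card, pvGoB, if_neg hxp, ihx]
        push_cast; ring

-- B's result is the number of distinct ids.
theorem pv_B_card (ids : List (List Char)) :
    (match PySem.List.sorted ids (fun x => x) with
      | [] => (0 : Int)
      | x :: rest => 1 + pvGoB x rest) = (ids.toFinset.card : Int) := by
  have hinstD : (fun (a b : List Char) => a.decidableLT b) = (LinearOrder.toDecidableLT (α := List Char)) := by
    funext a b; exact Subsingleton.elim _ _
  have hinstLT : (List.instLinearOrder.toLT : LT (List Char)) = List.instLT := rfl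
  have hfin : (PySem.List.sorted ids (fun x => x)).toFinset = ids.toFinset := by
    ext k; simp [PySem.List.mem_sorted]
  have hpw : (PySem.List.sorted ids (fun x => x)).Pairwise (· ≤ ·) := by
    have h := PySem.List.sorted_pairwise (κ := List Char) ids (fun x => x)
    rw [← hinstD] at h
    exact h
  rcases hsort : PySem.List.sorted ids (fun x => x) with _ | ⟨x, rest⟩
  · rw [hsort] at hfin
    simp [← hfin]
  · rw [hsort] at hfin hpw
    have hrest : rest.Pairwise (· ≤ ·) := (List.pairwise_cons.mp hpw).2
    have hx : ∀ y ∈ rest, x ≤ y := (List.pairwise_cons.mp hpw).1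
    show 1 + pvGoB x rest = (ids.toFinset.card : Int)
    rw [pv_goB_card rest x hrest hx, ← hfin]
    simp only [List.toFinset_cons, pv_insert_card]
    push_cast; ring

-- ===== VERDICT (by name: the statement is the Claim_ definition above) =====
theorem calSamNum_spec : Claim_equal_calSamNum := by
  intro name_str _ _
  unfold Spec_calSamNum
  have key : ∀ (L : List (List Char)) (g : List Char → List Char),
      ((L.foldl (fun d s => d.insert (g s) (1 : Int)) (PySem.Dict.empty : PySem.Dict (List Char) Int)).keys.length : Int)
        = (match PySem.List.sorted (L.map g) (fun x => x) with
           | [] => (0 : Int)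
           | x :: rest => 1 + pvGoB x rest) := by
    intro L g
    have hfold : (L.map g).foldl (fun d x => d.insert x (1 : Int)) (PySem.Dict.empty : PySem.Dict (List Char) Int)
        = L.foldl (fun d s => d.insert (g s) (1 : Int)) (PySem.Dict.empty : PySem.Dict (List Char) Int) := by
      rw [List.foldl_map]
    rw [← hfold, pv_A_card, pv_B_card]
  exact key (PySem.Chars.splitOn name_str.toList [',']) (fun s => (PySem.Chars.splitOn s [':']).headD [])
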